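-- pv_equiv track=rewrite | github.com/Jwbeiisk/daily-coding-problem | feb-2021/Feb1.py | sevenish
-- ===== SOURCE A (Python) =====
-- def sevenish(n):
--     res = 0
--     order = 0
--
--     while n:
--         if n & 1:               # if n in binary ends in 1 (is odd)
--             res += 7 ** order
--
--         n >>= 1                 # shift n to divide by 2 (next digit in binary form of n)
--         order += 1
--
--     return res
-- ===== SOURCE B (Python) =====
-- def sevenish(n):
--     res = 0
--     for c in bin(n)[2:]:
--         res = res * 7 + int(c)
--     return res
-- ===== Notes on version B (the rewrite author's own statement) =====
-- stated objective: simpler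
-- what changed: Replaces the LSB-to-MSB power-sum loop (res += 7**order per set bit) with a single MSB-first Horner fold over the binary string bin(n)[2:].
import Mathlib
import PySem

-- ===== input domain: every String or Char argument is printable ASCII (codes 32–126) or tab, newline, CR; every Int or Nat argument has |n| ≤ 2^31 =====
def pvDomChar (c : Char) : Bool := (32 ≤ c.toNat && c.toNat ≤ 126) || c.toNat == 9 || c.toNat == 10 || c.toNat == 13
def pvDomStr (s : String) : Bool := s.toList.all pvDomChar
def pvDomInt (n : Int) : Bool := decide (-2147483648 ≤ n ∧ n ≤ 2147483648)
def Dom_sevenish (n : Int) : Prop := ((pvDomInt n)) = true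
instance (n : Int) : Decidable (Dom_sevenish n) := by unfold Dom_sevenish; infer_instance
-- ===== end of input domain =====

-- B replaces A's LSB-to-MSB power-sum loop with an MSB-first Horner fold over the binary digits (simpler).


-- ===== PORT A =====
-- while n: if n & 1: res += 7**order; n >>= 1; order += 1
-- For n > 0, 'n & 1' is n % 2 and 'n >>= 1' is floor division by 2; 7**order with
-- order ≥ 0 is 7 ^ order.toNat.  The 'n ≤ 0 → return res' guard only makes the
-- recursion total: under Pre_ (0 ≤ n) it coincides with Python's 'while n'.
def sevenishLoop (n res order : Int) : Int :=
  if h : n ≤ 0 then res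
  else
    sevenishLoop (PySem.Int.floordiv n 2)
      (if PySem.Int.mod n 2 = 1 then res + 7 ^ order.toNat else res) (order + 1)
termination_by n.toNat
decreasing_by
  have h2 : PySem.Int.floordiv n 2 = n / 2 := PySem.Int.floordiv_eq_ediv_of_pos (by omega)
  simp only [h2]; omega

def sevenish (n : Int) : Int := sevenishLoop n 0 0

-- ===== PORT B =====
-- bin(n)[2:] for n ≥ 0: the binary digits of n, most significant first (a single zero digit when n has no set bits);
-- ported by hand on the digit list (exact for n ≥ 0; bin is not in PySem).
def bitsMSB (n : Nat) : List Nat :=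
  if n = 0 then [] else bitsMSB (n / 2) ++ [n % 2]

def binDigits (n : Nat) : List Nat :=
  if n = 0 then [0] else bitsMSB n

-- res = res * 7 + int(c) over the digit string, left to right
def sevenish_alt (n : Int) : Int :=
  (binDigits n.toNat).foldl (fun (res : Int) (c : Nat) => res * 7 + (c : Int)) 0

-- ===== PRECONDITION & SPEC =====
-- Pre_ excludes n < 0, where Python A never terminates ('n >>= 1' stays negative forever).
def Pre_sevenish (n : Int) : Prop := 0 ≤ n
instance (n : Int) : Decidable (Pre_sevenish n) := by unfold Pre_sevenish; infer_instance
def pvWitness_sevenish : Int := (13)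

def Spec_sevenish (n : Int) (out : Int) : Prop := out = sevenish_alt n
instance (n : Int) (out : Int) : Decidable (Spec_sevenish n out) := by unfold Spec_sevenish; infer_instance

-- ===== CLAIM (what is proved, stated in full; the proofs are below) =====
def Claim_equal_sevenish : Prop := ∀ (n : Int), Dom_sevenish n → Pre_sevenish n → Spec_sevenish n (sevenish n)

-- ===== LEMMAS AND PROOFS =====

-- the common value: base-7 reading of the binary digits of n
def gval (n : Nat) : Int :=
  if n = 0 then 0 else 7 * gval (n / 2) + ((n % 2 : Nat) : Int)

theorem loop_eq_gval (k : Nat) (res order : Int) (ho : 0 ≤ order) :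
    sevenishLoop (k : Int) res order = res + 7 ^ order.toNat * gval k := by
  induction k using Nat.strong_induction_on generalizing res order with
  | _ k ih =>
    rw [sevenishLoop, gval]
    by_cases hk : k = 0
    · simp [hk]
    · have hkpos : (0:Int) < (k:Int) := by exact_mod_cast Nat.pos_of_ne_zero hk
      rw [dif_neg (by omega)]
      have hfd : PySem.Int.floordiv (k : Int) 2 = ((k / 2 : Nat) : Int) :=
        PySem.Int.floordiv_natCast k 2
      have hmd : PySem.Int.mod (k : Int) 2 = ((k % 2 : Nat) : Int) :=
        PySem.Int.mod_natCast k 2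
      rw [hfd, hmd, ih (k / 2) (Nat.div_lt_self (Nat.pos_of_ne_zero hk) (by norm_num)) _ _ (by omega)]
      have hto : (order + 1).toNat = order.toNat + 1 := by omega
      rw [if_neg hk, hto]
      rcases Nat.mod_two_eq_zero_or_one k with h2 | h2 <;> rw [h2] <;>
        push_cast <;> rw [pow_succ] <;> ring

theorem foldl_bits (k : Nat) (res : Int) :
    (bitsMSB k).foldl (fun (res : Int) (c : Nat) => res * 7 + (c : Int)) res =
      res * 7 ^ (bitsMSB k).length + gval k := by
  induction k using Nat.strong_induction_on generalizing res with
  | _ k ih =>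
    rw [bitsMSB, gval]
    by_cases hk : k = 0
    · simp [hk]
    · rw [if_neg hk, if_neg hk, List.foldl_append,
        ih (k / 2) (Nat.div_lt_self (Nat.pos_of_ne_zero hk) (by norm_num))]
      simp [pow_succ]; ring

theorem alt_eq_gval (k : Nat) : sevenish_alt (k : Int) = gval k := by
  unfold sevenish_alt binDigits
  rw [Int.toNat_natCast]
  by_cases hk : k = 0
  · simp [hk, gval]
  · rw [if_neg hk, foldl_bits]; ring

-- ===== VERDICT (by name: the statement is the Claim_ definition above) =====
theorem sevenish_spec : Claim_equal_sevenish := by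
  intro n _ hpre
  unfold Spec_sevenish sevenish
  obtain ⟨k, rfl⟩ := Int.eq_ofNat_of_zero_le hpre
  rw [alt_eq_gval, loop_eq_gval k 0 0 le_rfl]
  simp
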